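-- pv_equiv track=rewrite | github.com/supermari0/cs224NFinal | classify.py | common_bigram_feature_dict
-- ===== SOURCE A (Python) =====
-- def common_bigram_feature_dict(common_bigrams_dict, token_tuples):
--     """ Helper function for common_bigram_features. """
--     for i in range(1, len(token_tuples)):
--         token = token_tuples[i][0]
--         prev_token = token_tuples[i-1][0]
--         bigram = prev_token + '+' + token
--         if bigram in common_bigrams_dict:
--             common_bigrams_dict[bigram] = 1
--
--     return common_bigrams_dict
-- ===== SOURCE B (Python) =====
-- def common_bigram_feature_dict(common_bigrams_dict, token_tuples):
--     """ Helper function for common_bigram_features. """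
--     seen = set()
--     for prev, cur in zip(token_tuples, token_tuples[1:]):
--         seen.add(prev[0] + '+' + cur[0])
--     for key in common_bigrams_dict:
--         if key in seen:
--             common_bigrams_dict[key] = 1
--     return common_bigrams_dict
-- ===== Notes on version B (the rewrite author's own statement) =====
-- stated objective: alternative
-- what changed: Instead of scanning index pairs and probing the dict per bigram, B builds a set of all observed adjacent bigrams in one zip pass and then marks the dict's own keys that occur in that set.
import Mathlib
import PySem

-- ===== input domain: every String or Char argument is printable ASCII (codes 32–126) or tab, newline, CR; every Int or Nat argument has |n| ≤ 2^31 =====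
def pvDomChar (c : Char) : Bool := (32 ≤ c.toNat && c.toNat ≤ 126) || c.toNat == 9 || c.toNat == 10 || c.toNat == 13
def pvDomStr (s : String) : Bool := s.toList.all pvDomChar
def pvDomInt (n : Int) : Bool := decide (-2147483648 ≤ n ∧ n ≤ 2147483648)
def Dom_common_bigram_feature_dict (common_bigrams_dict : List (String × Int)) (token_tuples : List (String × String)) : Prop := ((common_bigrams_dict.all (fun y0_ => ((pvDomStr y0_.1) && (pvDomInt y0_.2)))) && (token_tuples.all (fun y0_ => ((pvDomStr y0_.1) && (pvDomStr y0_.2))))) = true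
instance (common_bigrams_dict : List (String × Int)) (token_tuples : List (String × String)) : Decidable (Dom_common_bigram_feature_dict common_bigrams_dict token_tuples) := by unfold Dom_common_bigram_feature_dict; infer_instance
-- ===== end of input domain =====

-- B builds a set of the observed adjacent bigrams in one pass and then marks the dict keys found in it (alternative decomposition, same cost); the Python mutates the dict in place — equivalence here is about the returned value.


-- ===== PORT A =====
def common_bigram_feature_dict (common_bigrams_dict : List (String × Int)) (token_tuples : List (String × String)) : List (String × Int) :=
  let d0 : PySem.Dict String Int := PySem.Dict.ofList common_bigrams_dict
  let d := (PySem.List.pyRange 1 (token_tuples.length : Int) 1).foldl (fun d i =>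
    let token := (PySem.List.pyGetD token_tuples i ("", "")).1
    let prev_token := (PySem.List.pyGetD token_tuples (i - 1) ("", "")).1
    let bigram := prev_token ++ "+" ++ token
    if d.contains bigram then d.insert bigram 1 else d) d0
  d.items

-- ===== PORT B =====
def common_bigram_feature_dict_alt (common_bigrams_dict : List (String × Int)) (token_tuples : List (String × String)) : List (String × Int) :=
  let d0 : PySem.Dict String Int := PySem.Dict.ofList common_bigrams_dict
  let seen : PySem.Set String := (token_tuples.zip (token_tuples.drop 1)).foldl
    (fun s p => PySem.Set.add s (p.1.1 ++ "+" ++ p.2.1)) PySem.Set.empty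
  let d := d0.keys.foldl (fun d k => if PySem.Set.contains seen k then d.insert k 1 else d) d0
  d.items

-- ===== PRECONDITION & SPEC =====
def Spec_common_bigram_feature_dict (common_bigrams_dict : List (String × Int)) (token_tuples : List (String × String)) (out : List (String × Int)) : Prop := out = common_bigram_feature_dict_alt common_bigrams_dict token_tuples
instance (common_bigrams_dict : List (String × Int)) (token_tuples : List (String × String)) (out : List (String × Int)) : Decidable (Spec_common_bigram_feature_dict common_bigrams_dict token_tuples out) := by unfold Spec_common_bigram_feature_dict; infer_instance

-- ===== CLAIM (what is proved, stated in full; the proofs are below) =====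
def Claim_equal_common_bigram_feature_dict : Prop := ∀ (common_bigrams_dict : List (String × Int)) (token_tuples : List (String × String)), Dom_common_bigram_feature_dict common_bigrams_dict token_tuples → Spec_common_bigram_feature_dict common_bigrams_dict token_tuples (common_bigram_feature_dict common_bigrams_dict token_tuples)

-- ===== LEMMAS AND PROOFS =====

/-- The bigram strings of the adjacent token pairs, in order. -/
def pvBigrams (token_tuples : List (String × String)) : List String :=
  (token_tuples.zip (token_tuples.drop 1)).map (fun p => p.1.1 ++ "+" ++ p.2.1)

/-- Indexing adjacent pairs equals zipping with the tail. -/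
lemma pv_adj_map (tt : List (String × String)) :
    (List.range (tt.length - 1)).map
      (fun k => (tt.getD k ("", "")).1 ++ "+" ++ (tt.getD (k+1) ("", "")).1)
      = pvBigrams tt := by
  apply List.ext_getElem
  · simp [pvBigrams]; try omega
  · intro i h1 h2
    have hlen : i < tt.length - 1 := by simpa using h1
    simp [pvBigrams, List.getD_eq_getElem?_getD,
      (by omega : i < tt.length), (by omega : i + 1 < tt.length)]

/-- A's loop over indices is the bigram-list fold. -/
lemma pv_A_fold (tt : List (String × String)) (d0 : PySem.Dict String Int) :
    (PySem.List.pyRange 1 (tt.length : Int) 1).foldl (fun d i =>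
      let token := (PySem.List.pyGetD tt i ("", "")).1
      let prev_token := (PySem.List.pyGetD tt (i - 1) ("", "")).1
      let bigram := prev_token ++ "+" ++ token
      if d.contains bigram then d.insert bigram 1 else d) d0
    = (pvBigrams tt).foldl (fun d b => if d.contains b then d.insert b 1 else d) d0 := by
  rw [PySem.List.pyRange_one, List.foldl_map, ← pv_adj_map tt, List.foldl_map]
  have hn : ((tt.length : Int) - 1).toNat = tt.length - 1 := by omega
  rw [hn]
  congr 1
  funext d k
  have h1 : (1 : Int) + (k : Int) = ((k + 1 : Nat) : Int) := by push_cast; ring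
  have h2 : ((k + 1 : Nat) : Int) - 1 = ((k : Nat) : Int) := by push_cast; ring
  simp only [h1, h2, PySem.List.pyGetD_natCast]

/-- A's fold marks exactly the existing keys occurring in the bigram list. -/
lemma pv_A_items (bs : List String) (d : PySem.Dict String Int) (hnd : d.keys.Nodup) :
    (bs.foldl (fun d b => if d.contains b then d.insert b 1 else d) d).items
      = d.items.map (fun p => if bs.contains p.1 then (p.1, (1 : Int)) else p) := by
  induction bs generalizing d with
  | nil => simp
  | cons b rest ih =>
    simp only [List.foldl_cons]
    by_cases hb : d.contains b = true
    · rw [if_pos hb, ih _ ?nd]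
      case nd =>
        rw [PySem.Dict.keys_insert_of_contains _ _ hb]; exact hnd
      rw [PySem.Dict.items_insert_of_contains _ _ hb, List.map_map]
      apply List.map_congr_left
      intro p hp
      by_cases hpk : p.1 = b
      · simp [Function.comp, hpk]
      · simp [Function.comp, hpk]
    · rw [if_neg hb, ih _ hnd]
      apply List.map_congr_left
      intro p hp
      have hpk : p.1 ≠ b := by
        intro h
        exact hb ((PySem.Dict.contains_iff_mem_keys _ _).2
          (h ▸ PySem.Dict.mem_keys_of_mem_items (d := d) (p := p) hp))
      simp [hpk]

/-- B's fold over a list of existing keys marks the keys satisfying P. -/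
lemma pv_B_items (P : String → Bool) (ks : List String) (d : PySem.Dict String Int)
    (hnd : d.keys.Nodup) (hks : ∀ k ∈ ks, d.contains k = true) :
    (ks.foldl (fun d k => if P k then d.insert k 1 else d) d).items
      = d.items.map (fun p => if ks.contains p.1 && P p.1 then (p.1, (1 : Int)) else p) := by
  induction ks generalizing d with
  | nil => simp
  | cons k rest ih =>
    simp only [List.foldl_cons]
    have hk : d.contains k = true := hks k (by simp)
    by_cases hP : P k = true
    · rw [if_pos hP, ih _ ?nd ?rest]
      case nd =>
        rw [PySem.Dict.keys_insert_of_contains _ _ hk]; exact hnd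
      case rest =>
        intro k' hk'
        rw [PySem.Dict.contains_insert]
        simp [hks k' (by simp [hk'])]
      rw [PySem.Dict.items_insert_of_contains _ _ hk, List.map_map]
      apply List.map_congr_left
      intro p hp
      by_cases hpk : p.1 = k
      · simp [Function.comp, hpk, hP]
      · simp [Function.comp, hpk]
    · rw [if_neg hP, ih _ hnd (fun k' hk' => hks k' (by simp [hk']))]
      apply List.map_congr_left
      intro p hp
      by_cases hpk : p.1 = k
      · simp [hpk, Bool.eq_false_iff.mpr hP]
      · simp [hpk]

-- ===== VERDICT (by name: the statement is the Claim_ definition above) =====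
theorem common_bigram_feature_dict_spec : Claim_equal_common_bigram_feature_dict := by
  intro cbd tt _
  unfold Spec_common_bigram_feature_dict common_bigram_feature_dict common_bigram_feature_dict_alt
  simp only []
  rw [pv_A_fold]
  have hseen : (tt.zip (tt.drop 1)).foldl
      (fun s p => PySem.Set.add s (p.1.1 ++ "+" ++ p.2.1)) PySem.Set.empty
      = PySem.Set.ofList (pvBigrams tt) := by
    rw [← PySem.Set.update_map_eq_foldl_add]
    rfl
  rw [hseen, pv_A_items _ _ (PySem.Dict.nodup_keys_ofList cbd),
      pv_B_items _ _ _ (PySem.Dict.nodup_keys_ofList cbd)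
        (fun k hk => (PySem.Dict.contains_iff_mem_keys _ _).2 hk)]
  apply List.map_congr_left
  intro p hp
  have hkey : (PySem.Dict.ofList cbd).keys.contains p.1 = true := by
    have := PySem.Dict.mem_keys_of_mem_items (d := PySem.Dict.ofList cbd) (p := p) hp
    simp [this]
  have hset : PySem.Set.contains (PySem.Set.ofList (pvBigrams tt)) p.1
      = (pvBigrams tt).contains p.1 := by
    simp [PySem.Set.contains_eq_listContains, PySem.Set.mem_ofList]
  rw [hkey, hset]
  simp
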